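-- pv_equiv track=rewrite | github.com/CS4248-Team4/Features | sciCite.py | process_sectionNames
-- ===== SOURCE A (Python) =====
-- def process_sectionNames(sectionNames):
--     returned = []
--     for sectionName in sectionNames:
--         sectionName = str(sectionName)
--         newSectionName = sectionName.lower()
--         if newSectionName != None:
--             if "introduction" in newSectionName or "preliminaries" in newSectionName:
--                 newSectionName = "introduction"
--             elif "result" in newSectionName or "finding" in newSectionName:
--                 newSectionName = "results"
--             elif "method" in newSectionName or "approach" in newSectionName:
--                 newSectionName = "method"
--             elif "discussion" in newSectionName:
--                 newSectionName = "discussion"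
--             elif "background" in newSectionName:
--                 newSectionName = "background"
--             elif "experiment" in newSectionName or "setup" in newSectionName or "set-up" in newSectionName or "set up" in newSectionName:
--                 newSectionName = "experiment"
--             elif "related work" in newSectionName or "relatedwork" in newSectionName or "prior work" in newSectionName or "literature review" in newSectionName:
--                 newSectionName = "related work"
--             elif "evaluation" in newSectionName:
--                 newSectionName = "evaluation"
--             elif "implementation" in newSectionName:
--                 newSectionName = "implementation"
--             elif "conclusion" in newSectionName:
--                 newSectionName = "conclusion"
--             elif "limitation" in newSectionName:
--                 newSectionName = "limitation"
--             elif "appendix" in newSectionName: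
--                 newSectionName = "appendix"
--             elif "future work" in newSectionName or "extension" in newSectionName:
--                 newSectionName = "appendix"
--             elif "analysis" in newSectionName:
--                 newSectionName = "analysis"
--             else:
--                 newSectionName = "unspecified"
--         # returned.append(sec_name_mapping[newSectionName])
--         returned.append(newSectionName)
--     return returned
-- ===== SOURCE B (Python) =====
-- # Rule-major algorithm: one pass over the whole list per rule, in REVERSE
-- # priority order, overwriting an output table; the earliest-priority matching
-- # rule is written last, so it wins -- same result as A's first-match cascade.
-- RULES = [
--     (("introduction", "preliminaries"), "introduction"),
--     (("result", "finding"), "results"),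
--     (("method", "approach"), "method"),
--     (("discussion",), "discussion"),
--     (("background",), "background"),
--     (("experiment", "setup", "set-up", "set up"), "experiment"),
--     (("related work", "relatedwork", "prior work", "literature review"), "related work"),
--     (("evaluation",), "evaluation"),
--     (("implementation",), "implementation"),
--     (("conclusion",), "conclusion"),
--     (("limitation",), "limitation"),
--     (("appendix",), "appendix"),
--     (("future work", "extension"), "appendix"),
--     (("analysis",), "analysis"),
-- ]
--
--
-- def process_sectionNames(sectionNames):
--     lows = [str(name).lower() for name in sectionNames]
--     out = ["unspecified"] * len(lows)
--     for subs, label in reversed(RULES):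
--         for i, s in enumerate(lows):
--             if any(sub in s for sub in subs):
--                 out[i] = label
--     return out
-- ===== Notes on version B (the rewrite author's own statement) =====
-- stated objective: alternative
-- what changed: Inverts the loop nesting: instead of classifying each name by a first-match elif cascade, B makes one pass over the whole list per rule, iterating the ordered rule table in reverse priority and overwriting an output table, so the highest-priority matching rule is written last.
import Mathlib
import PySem

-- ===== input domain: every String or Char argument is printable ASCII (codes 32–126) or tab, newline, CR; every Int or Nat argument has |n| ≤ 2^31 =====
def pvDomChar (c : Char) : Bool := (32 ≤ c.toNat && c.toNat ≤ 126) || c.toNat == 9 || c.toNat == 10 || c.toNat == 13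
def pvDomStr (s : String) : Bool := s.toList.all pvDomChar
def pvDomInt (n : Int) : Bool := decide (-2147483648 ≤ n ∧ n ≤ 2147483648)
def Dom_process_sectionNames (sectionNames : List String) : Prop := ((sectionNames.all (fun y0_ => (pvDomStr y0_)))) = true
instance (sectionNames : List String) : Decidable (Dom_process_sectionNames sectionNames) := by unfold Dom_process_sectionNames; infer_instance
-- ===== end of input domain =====

-- B inverts the loop nesting (one pass over the list per rule, reverse priority, overwriting an output table); alternative structure, equal cost.

-- ===== PORT A =====
-- Loop body of A: str() is identity on str inputs; 'newSectionName != None' is always true after .lower().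
def pvClassifyA (sectionName : String) : String :=
  let newSectionName := PySem.Str.lower sectionName
  if PySem.Str.isIn "introduction" newSectionName || PySem.Str.isIn "preliminaries" newSectionName then "introduction"
  else if PySem.Str.isIn "result" newSectionName || PySem.Str.isIn "finding" newSectionName then "results"
  else if PySem.Str.isIn "method" newSectionName || PySem.Str.isIn "approach" newSectionName then "method"
  else if PySem.Str.isIn "discussion" newSectionName then "discussion"
  else if PySem.Str.isIn "background" newSectionName then "background"
  else if PySem.Str.isIn "experiment" newSectionName || PySem.Str.isIn "setup" newSectionName || PySem.Str.isIn "set-up" newSectionName || PySem.Str.isIn "set up" newSectionName then "experiment"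
  else if PySem.Str.isIn "related work" newSectionName || PySem.Str.isIn "relatedwork" newSectionName || PySem.Str.isIn "prior work" newSectionName || PySem.Str.isIn "literature review" newSectionName then "related work"
  else if PySem.Str.isIn "evaluation" newSectionName then "evaluation"
  else if PySem.Str.isIn "implementation" newSectionName then "implementation"
  else if PySem.Str.isIn "conclusion" newSectionName then "conclusion"
  else if PySem.Str.isIn "limitation" newSectionName then "limitation"
  else if PySem.Str.isIn "appendix" newSectionName then "appendix"
  else if PySem.Str.isIn "future work" newSectionName || PySem.Str.isIn "extension" newSectionName then "appendix"
  else if PySem.Str.isIn "analysis" newSectionName then "analysis"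
  else "unspecified"

def process_sectionNames (sectionNames : List String) : List String :=
  sectionNames.foldl (fun returned sectionName => returned ++ [pvClassifyA sectionName]) []

-- ===== PORT B =====
def pvRULES : List (List String × String) :=
  [ (["introduction", "preliminaries"], "introduction"),
    (["result", "finding"], "results"),
    (["method", "approach"], "method"),
    (["discussion"], "discussion"),
    (["background"], "background"),
    (["experiment", "setup", "set-up", "set up"], "experiment"),
    (["related work", "relatedwork", "prior work", "literature review"], "related work"),
    (["evaluation"], "evaluation"),
    (["implementation"], "implementation"),
    (["conclusion"], "conclusion"),
    (["limitation"], "limitation"),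
    (["appendix"], "appendix"),
    (["future work", "extension"], "appendix"),
    (["analysis"], "analysis") ]

def pvMatch (subs : List String) (s : String) : Bool :=
  subs.any (fun sub => PySem.Str.isIn sub s)

-- one pass over the list for one rule: out[i] := label where the rule matches lows[i]
def pvApplyRule (lows : List String) (out : List String) (rule : List String × String) : List String :=
  List.zipWith (fun s cur => if pvMatch rule.1 s then rule.2 else cur) lows out

def process_sectionNames_alt (sectionNames : List String) : List String :=
  let lows := sectionNames.map (fun name => PySem.Str.lower name)
  let out := lows.map (fun _ => "unspecified")
  pvRULES.reverse.foldl (fun out rule => pvApplyRule lows out rule) out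

-- ===== PRECONDITION & SPEC =====
def Spec_process_sectionNames (sectionNames : List String) (out : List String) : Prop := out = process_sectionNames_alt sectionNames
instance (sectionNames : List String) (out : List String) : Decidable (Spec_process_sectionNames sectionNames out) := by unfold Spec_process_sectionNames; infer_instance

-- ===== CLAIM (what is proved, stated in full; the proofs are below) =====
def Claim_equal_process_sectionNames : Prop := ∀ (sectionNames : List String), Dom_process_sectionNames sectionNames → Spec_process_sectionNames sectionNames (process_sectionNames sectionNames)

-- ===== LEMMAS AND PROOFS =====

-- a rule pass on a map-shaped table is a map
theorem zipWith_map_self {α β : Type} (f : α → β) (g : α → β → β) (l : List α) :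
    List.zipWith (fun s cur => g s cur) l (l.map f) = l.map (fun s => g s (f s)) := by
  induction l with
  | nil => rfl
  | cons x xs ih => simp [ih]

-- rule-major folding over a map-shaped table = element-wise folding over the rules
theorem foldl_applyRule_map (rules : List (List String × String)) (lows : List String)
    (h : String → String) :
    rules.foldl (fun out rule => pvApplyRule lows out rule) (lows.map h)
      = lows.map (fun s => rules.foldl (fun cur rule => if pvMatch rule.1 s then rule.2 else cur) (h s)) := by
  induction rules generalizing h with
  | nil => rfl
  | cons r rs ih =>
      rw [List.foldl_cons]
      have : pvApplyRule lows (lows.map h) r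
          = lows.map (fun s => if pvMatch r.1 s then r.2 else h s) := by
        unfold pvApplyRule; exact zipWith_map_self h _ lows
      rw [this, ih]
      simp

-- per element, the reverse overwrite fold computes A's cascade
theorem perElem_eq (s : String) :
    pvRULES.reverse.foldl
        (fun cur rule => if pvMatch rule.1 (PySem.Str.lower s) then rule.2 else cur) "unspecified"
      = pvClassifyA s := by
  unfold pvRULES pvClassifyA pvMatch
  simp [List.foldl, Bool.or_assoc]

-- A's accumulator loop builds the map
theorem foldl_append_eq_map (l : List String) (acc : List String) :
    l.foldl (fun returned sectionName => returned ++ [pvClassifyA sectionName]) acc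
      = acc ++ l.map pvClassifyA := by
  induction l generalizing acc with
  | nil => simp
  | cons x xs ih => rw [List.foldl_cons, ih]; simp

-- ===== VERDICT (by name: the statement is the Claim_ definition above) =====
theorem process_sectionNames_spec : Claim_equal_process_sectionNames := by
  intro sectionNames _
  unfold Spec_process_sectionNames process_sectionNames process_sectionNames_alt
  have hB : pvRULES.reverse.foldl
        (fun out rule => pvApplyRule (sectionNames.map (fun name => PySem.Str.lower name)) out rule)
        ((sectionNames.map (fun name => PySem.Str.lower name)).map (fun _ => "unspecified"))
      = sectionNames.map pvClassifyA := by
    rw [foldl_applyRule_map, List.map_map]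
    refine List.map_congr_left ?_
    intro a _
    simp only [Function.comp_apply]
    exact perElem_eq a
  rw [foldl_append_eq_map, hB]
  simp
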